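-- pv_equiv track=rewrite | github.com/GKCBACKHAM/Daily | 素数转圈问题1.2.py | divide_xy_ans
-- ===== SOURCE A (Python) =====
-- def extreme_value(max_val,min_val,x):
--     # 更新最大值和最小值
--     return max(x,max_val),min(x,min_val)
--
-- def divide_xy_ans(n,delta_list):
--     # 计算x和y方向的最远距离
--     x,y,xmax,xmin,ymax,ymin=0,0,0,0,0,0
--     for idx,delta in enumerate(delta_list):
--         if idx%4==0:
--             x+=delta
--         elif idx%4==1:
--             y-=delta
--         elif idx%4==2:
--             x-=delta
--         elif idx%4==3:
--             y+=delta
--         xmax,xmin=extreme_value(xmax,xmin,x)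
--         ymax,ymin=extreme_value(ymax,ymin,y)
--     return (xmax-xmin,ymax-ymin)
-- ===== SOURCE B (Python) =====
-- def divide_xy_ans(n, delta_list):
--     # divide-and-conquer: per-axis signed steps, then monoid aggregation over halves
--     xs = [d if i % 4 == 0 else -d for i, d in enumerate(delta_list) if i % 2 == 0]
--     ys = [d if i % 4 == 3 else -d for i, d in enumerate(delta_list) if i % 2 == 1]
--     return (span(xs), span(ys))
--
-- def span(steps):
--     s, hi, lo = agg(steps)
--     return hi - lo
--
-- def agg(steps):
--     # (total sum, max prefix sum, min prefix sum) including the empty prefix 0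
--     if len(steps) <= 1:
--         if not steps:
--             return (0, 0, 0)
--         d = steps[0]
--         return (d, max(d, 0), min(d, 0))
--     m = len(steps) // 2
--     return comb(agg(steps[:m]), agg(steps[m:]))
--
-- def comb(a, b):
--     return (a[0] + b[0], max(a[1], a[0] + b[1]), min(a[2], a[0] + b[2]))
-- ===== Notes on version B (the rewrite author's own statement) =====
-- stated objective: alternative
-- what changed: Replaces A's sequential six-variable loop with a divide-and-conquer monoid aggregation: each axis's signed steps are summarized per half as a (sum, max-prefix, min-prefix) triple and the halves are combined associatively, with no running accumulation.
import Mathlib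
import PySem

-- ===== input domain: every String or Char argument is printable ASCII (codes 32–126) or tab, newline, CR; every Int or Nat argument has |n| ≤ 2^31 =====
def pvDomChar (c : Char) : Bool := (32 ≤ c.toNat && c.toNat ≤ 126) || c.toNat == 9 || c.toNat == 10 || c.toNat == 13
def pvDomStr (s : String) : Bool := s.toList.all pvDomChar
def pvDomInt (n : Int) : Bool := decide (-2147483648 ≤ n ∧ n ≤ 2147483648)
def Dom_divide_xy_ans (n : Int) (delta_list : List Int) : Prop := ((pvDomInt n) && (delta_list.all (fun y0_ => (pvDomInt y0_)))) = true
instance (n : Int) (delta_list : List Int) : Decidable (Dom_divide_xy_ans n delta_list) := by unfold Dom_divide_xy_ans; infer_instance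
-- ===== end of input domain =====

-- B replaces A's sequential six-variable loop by a per-axis divide-and-conquer (sum, max-prefix, min-prefix) monoid aggregation (alternative decomposition, same cost).


-- ===== PORT A =====
def extreme_value (max_val min_val x : Int) : Int × Int := (max x max_val, min x min_val)

def pvStepA (st : Int × Int × Int × Int × Int × Int) (p : Int × Int) :
    Int × Int × Int × Int × Int × Int :=
  let (x, y, xmax, xmin, ymax, ymin) := st
  let (idx, delta) := p
  let (x, y) :=
    if PySem.Int.mod idx 4 == 0 then (x + delta, y)
    else if PySem.Int.mod idx 4 == 1 then (x, y - delta)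
    else if PySem.Int.mod idx 4 == 2 then (x - delta, y)
    else if PySem.Int.mod idx 4 == 3 then (x, y + delta)
    else (x, y)
  let (xmax, xmin) := extreme_value xmax xmin x
  let (ymax, ymin) := extreme_value ymax ymin y
  (x, y, xmax, xmin, ymax, ymin)

def divide_xy_ans (n : Int) (delta_list : List Int) : Int × Int :=
  let st := (PySem.List.enumerate delta_list).foldl pvStepA (0, 0, 0, 0, 0, 0)
  let (_, _, xmax, xmin, ymax, ymin) := st
  (xmax - xmin, ymax - ymin)

-- ===== PORT B =====
def pvKeepX (p : Int × Int) : Bool := PySem.Int.mod p.1 2 == 0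
def pvKeepY (p : Int × Int) : Bool := PySem.Int.mod p.1 2 == 1
def pvSignX (p : Int × Int) : Int := if PySem.Int.mod p.1 4 == 0 then p.2 else -p.2
def pvSignY (p : Int × Int) : Int := if PySem.Int.mod p.1 4 == 3 then p.2 else -p.2

def pvComb (a b : Int × Int × Int) : Int × Int × Int :=
  (a.1 + b.1, max a.2.1 (a.1 + b.2.1), min a.2.2 (a.1 + b.2.2))

-- steps[:m] / steps[m:] with 0 ≤ m ≤ len are exactly List.take m / List.drop m
def pvAgg (steps : List Int) : Int × Int × Int :=
  if h0 : steps.length ≤ 1 then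
    match steps with
    | [] => (0, 0, 0)
    | d :: _ => (d, max d 0, min d 0)
  else
    let m := steps.length / 2
    pvComb (pvAgg (steps.take m)) (pvAgg (steps.drop m))
termination_by steps.length
decreasing_by
  · simp only [List.length_take]; omega
  · simp only [List.length_drop]; omega

def pvSpan (steps : List Int) : Int :=
  let f := pvAgg steps
  f.2.1 - f.2.2

def divide_xy_ans_alt (n : Int) (delta_list : List Int) : Int × Int :=
  let xs := ((PySem.List.enumerate delta_list).filter pvKeepX).map pvSignX
  let ys := ((PySem.List.enumerate delta_list).filter pvKeepY).map pvSignY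
  (pvSpan xs, pvSpan ys)

-- ===== PRECONDITION & SPEC =====
def Spec_divide_xy_ans (n : Int) (delta_list : List Int) (out : Int × Int) : Prop := out = divide_xy_ans_alt n delta_list
instance (n : Int) (delta_list : List Int) (out : Int × Int) : Decidable (Spec_divide_xy_ans n delta_list out) := by unfold Spec_divide_xy_ans; infer_instance

-- ===== CLAIM (what is proved, stated in full; the proofs are below) =====
def Claim_equal_divide_xy_ans : Prop := ∀ (n : Int) (delta_list : List Int), Dom_divide_xy_ans n delta_list → Spec_divide_xy_ans n delta_list (divide_xy_ans n delta_list)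

-- ===== LEMMAS AND PROOFS =====

-- reference sequential form of the per-axis span state used only in the proof
def pvSpanStep (st : Int × Int × Int) (s : Int) : Int × Int × Int :=
  let cur := st.1 + s
  (cur, max st.2.1 cur, min st.2.2 cur)

def pvF (steps : List Int) : Int × Int × Int := steps.foldl pvSpanStep (0, 0, 0)

-- running the fold from an arbitrary in-invariant state = shifting pvF
lemma pv_shift (xs : List Int) : ∀ (c h lo : Int), lo ≤ c → c ≤ h →
    xs.foldl pvSpanStep (c, h, lo) =
      (c + (pvF xs).1, max h (c + (pvF xs).2.1), min lo (c + (pvF xs).2.2)) := by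
  induction xs with
  | nil => intro c h lo h1 h2; simp [pvF]; omega
  | cons d t ih =>
    intro c h lo h1 h2
    have hF : pvF (d :: t) = t.foldl pvSpanStep (d, max 0 d, min 0 d) := by
      simp [pvF, pvSpanStep]
    rw [hF, ih (d) (max 0 d) (min 0 d) (min_le_right _ _) (le_max_right _ _)]
    have hL : (d :: t).foldl pvSpanStep (c, h, lo) =
        t.foldl pvSpanStep (c + d, max h (c + d), min lo (c + d)) := by
      simp [pvSpanStep]
    rw [hL, ih (c + d) (max h (c + d)) (min lo (c + d)) (min_le_right _ _) (le_max_right _ _)]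
    refine Prod.ext ?_ (Prod.ext ?_ ?_) <;> simp <;> omega

lemma pv_bounds_aux (xs : List Int) : ∀ (c h lo : Int), lo ≤ c → c ≤ h →
    (xs.foldl pvSpanStep (c, h, lo)).2.2 ≤ (xs.foldl pvSpanStep (c, h, lo)).1 ∧
      (xs.foldl pvSpanStep (c, h, lo)).1 ≤ (xs.foldl pvSpanStep (c, h, lo)).2.1 := by
  induction xs with
  | nil => intro c h lo h1 h2; exact ⟨h1, h2⟩
  | cons d t ih =>
    intro c h lo h1 h2
    have hL : (d :: t).foldl pvSpanStep (c, h, lo) =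
        t.foldl pvSpanStep (c + d, max h (c + d), min lo (c + d)) := by
      simp [pvSpanStep]
    rw [hL]
    exact ih (c + d) (max h (c + d)) (min lo (c + d)) (min_le_right _ _) (le_max_right _ _)

lemma pv_bounds (xs : List Int) : (pvF xs).2.2 ≤ (pvF xs).1 ∧ (pvF xs).1 ≤ (pvF xs).2.1 :=
  pv_bounds_aux xs 0 0 0 le_rfl le_rfl

lemma pvF_append (l1 l2 : List Int) : pvF (l1 ++ l2) = pvComb (pvF l1) (pvF l2) := by
  have hb := pv_bounds l1
  have : pvF (l1 ++ l2) = l2.foldl pvSpanStep (pvF l1) := by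
    simp [pvF, List.foldl_append]
  rw [this, show pvF l1 = ((pvF l1).1, (pvF l1).2.1, (pvF l1).2.2) from rfl,
    pv_shift l2 _ _ _ hb.1 hb.2]
  simp [pvComb]

lemma pvAgg_eq : ∀ (fuel : Nat) (l : List Int), l.length ≤ fuel → pvAgg l = pvF l := by
  intro fuel
  induction fuel with
  | zero =>
    intro l hl
    have : l = [] := List.eq_nil_of_length_eq_zero (Nat.le_zero.mp hl)
    subst this; rw [pvAgg]; simp [pvF]
  | succ k ih =>
    intro l hl
    rw [pvAgg]
    by_cases h0 : l.length ≤ 1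
    · simp only [h0, dif_pos]
      match l, h0 with
      | [], _ => simp [pvF]
      | [d], _ => simp [pvF, pvSpanStep, max_comm, min_comm]
    · simp only [h0, dif_neg, not_false_iff]
      have h2 : 2 ≤ l.length := by omega
      have ht : (l.take (l.length / 2)).length ≤ k := by simp; omega
      have hd : (l.drop (l.length / 2)).length ≤ k := by simp; omega
      rw [ih _ ht, ih _ hd, ← pvF_append, List.take_append_drop]

def pvPack (gx gy : Int × Int × Int) : Int × Int × Int × Int × Int × Int :=
  (gx.1, gy.1, gx.2.1, gx.2.2, gy.2.1, gy.2.2)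

-- A's six-variable fold equals the two per-dimension folds over the signed subsequences
lemma pv_key (ds : List Int) : ∀ (s x y xmax xmin ymax ymin : Int),
    xmin ≤ x → x ≤ xmax → ymin ≤ y → y ≤ ymax →
    (PySem.List.enumerate ds s).foldl pvStepA (x, y, xmax, xmin, ymax, ymin) =
      pvPack
        ((((PySem.List.enumerate ds s).filter pvKeepX).map pvSignX).foldl pvSpanStep (x, xmax, xmin))
        ((((PySem.List.enumerate ds s).filter pvKeepY).map pvSignY).foldl pvSpanStep (y, ymax, ymin)) := by
  induction ds with
  | nil => intro s x y xmax xmin ymax ymin _ _ _ _; simp [PySem.List.enumerate_nil, pvPack]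
  | cons d ds ih =>
    intro s x y xmax xmin ymax ymin h1 h2 h3 h4
    rw [PySem.List.enumerate_cons]
    have hm4 : PySem.Int.mod s 4 = s % 4 := by simp [PySem.Int.mod, Int.fmod_eq_emod]
    have hm2 : PySem.Int.mod s 2 = s % 2 := by simp [PySem.Int.mod, Int.fmod_eq_emod]
    have h4r : s % 4 = 0 ∨ s % 4 = 1 ∨ s % 4 = 2 ∨ s % 4 = 3 := by omega
    rcases h4r with h | h | h | h
    · have hkx : pvKeepX (s, d) = true := by simp [pvKeepX, hm2]; omega
      have hky : pvKeepY (s, d) = false := by simp [pvKeepY, hm2]; omega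
      have hsx : pvSignX (s, d) = d := by simp [pvSignX, hm4, h]
      have hstep : pvStepA (x, y, xmax, xmin, ymax, ymin) (s, d) =
          (x + d, y, max (x + d) xmax, min (x + d) xmin, ymax, ymin) := by
        simp [pvStepA, extreme_value, hm4, h, max_eq_right h4, min_eq_right h3]
      rw [List.foldl_cons, hstep, List.filter_cons, List.filter_cons, hkx, hky]
      simp only [reduceIte]
      rw [List.map_cons, hsx, List.foldl_cons,
        show pvSpanStep (x, xmax, xmin) d = (x + d, max xmax (x + d), min xmin (x + d)) from rfl,
        max_comm xmax (x + d), min_comm xmin (x + d)]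
      exact ih (s + 1) (x + d) y (max (x + d) xmax) (min (x + d) xmin) ymax ymin
        (min_le_left _ _) (le_max_left _ _) h3 h4
    · have hkx : pvKeepX (s, d) = false := by simp [pvKeepX, hm2]; omega
      have hky : pvKeepY (s, d) = true := by simp [pvKeepY, hm2]; omega
      have hsy : pvSignY (s, d) = -d := by simp [pvSignY, hm4, h]
      have hstep : pvStepA (x, y, xmax, xmin, ymax, ymin) (s, d) =
          (x, y - d, xmax, xmin, max (y - d) ymax, min (y - d) ymin) := by
        simp [pvStepA, extreme_value, hm4, h, max_eq_right h2, min_eq_right h1]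
      rw [List.foldl_cons, hstep, List.filter_cons, List.filter_cons, hkx, hky]
      simp only [reduceIte]
      rw [List.map_cons, hsy, List.foldl_cons,
        show pvSpanStep (y, ymax, ymin) (-d) = (y + -d, max ymax (y + -d), min ymin (y + -d)) from rfl,
        max_comm ymax (y + -d), min_comm ymin (y + -d),
        show y + -d = y - d by ring_nf]
      exact ih (s + 1) x (y - d) xmax xmin (max (y - d) ymax) (min (y - d) ymin)
        h1 h2 (min_le_left _ _) (le_max_left _ _)
    · have hkx : pvKeepX (s, d) = true := by simp [pvKeepX, hm2]; omega
      have hky : pvKeepY (s, d) = false := by simp [pvKeepY, hm2]; omega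
      have hsx : pvSignX (s, d) = -d := by simp [pvSignX, hm4, h]
      have hstep : pvStepA (x, y, xmax, xmin, ymax, ymin) (s, d) =
          (x - d, y, max (x - d) xmax, min (x - d) xmin, ymax, ymin) := by
        simp [pvStepA, extreme_value, hm4, h, max_eq_right h4, min_eq_right h3]
      rw [List.foldl_cons, hstep, List.filter_cons, List.filter_cons, hkx, hky]
      simp only [reduceIte]
      rw [List.map_cons, hsx, List.foldl_cons,
        show pvSpanStep (x, xmax, xmin) (-d) = (x + -d, max xmax (x + -d), min xmin (x + -d)) from rfl,
        max_comm xmax (x + -d), min_comm xmin (x + -d),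
        show x + -d = x - d by ring_nf]
      exact ih (s + 1) (x - d) y (max (x - d) xmax) (min (x - d) xmin) ymax ymin
        (min_le_left _ _) (le_max_left _ _) h3 h4
    · have hkx : pvKeepX (s, d) = false := by simp [pvKeepX, hm2]; omega
      have hky : pvKeepY (s, d) = true := by simp [pvKeepY, hm2]; omega
      have hsy : pvSignY (s, d) = d := by simp [pvSignY, hm4, h]
      have hstep : pvStepA (x, y, xmax, xmin, ymax, ymin) (s, d) =
          (x, y + d, xmax, xmin, max (y + d) ymax, min (y + d) ymin) := by
        simp [pvStepA, extreme_value, hm4, h, max_eq_right h2, min_eq_right h1]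
      rw [List.foldl_cons, hstep, List.filter_cons, List.filter_cons, hkx, hky]
      simp only [reduceIte]
      rw [List.map_cons, hsy, List.foldl_cons,
        show pvSpanStep (y, ymax, ymin) d = (y + d, max ymax (y + d), min ymin (y + d)) from rfl,
        max_comm ymax (y + d), min_comm ymin (y + d)]
      exact ih (s + 1) x (y + d) xmax xmin (max (y + d) ymax) (min (y + d) ymin)
        h1 h2 (min_le_left _ _) (le_max_left _ _)

-- ===== VERDICT (by name: the statement is the Claim_ definition above) =====
theorem divide_xy_ans_spec : Claim_equal_divide_xy_ans := by
  intro n ds _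
  unfold Spec_divide_xy_ans divide_xy_ans divide_xy_ans_alt
  rw [pv_key ds 0 0 0 0 0 0 0 le_rfl le_rfl le_rfl le_rfl]
  simp only [pvSpan, pvPack,
    pvAgg_eq _ _ (le_refl (((PySem.List.enumerate ds 0).filter pvKeepX).map pvSignX).length),
    pvAgg_eq _ _ (le_refl (((PySem.List.enumerate ds 0).filter pvKeepY).map pvSignY).length)]
  simp [pvF]
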